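-- pv_equiv track=rewrite | github.com/IanCarmona/Practicas-Algoritmos-Bioinspirados | Genetico-Cuadrado-Magico/P5.py | calculaAptitudMin
-- ===== SOURCE A (Python) =====
-- def redimensionar_lista_a_matriz(lista, n):
--     if len(lista) != n*n:
--         return "El número de elementos en la lista no coincide con una matriz de nxn."
--
--     matriz = [lista[i:i+n] for i in range(0, len(lista), n)]
--     return matriz
--
-- def calcular_suma_magica(n):
--     return n * (n**2 + 1) // 2
--
-- def calculaAptitudMin(X, n):
--
--     arr_2d = redimensionar_lista_a_matriz(X, n)
--
--
--     error = []
--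
--     for i in range(n):
--         suma = 0
--         for j in range(n):
--             suma += arr_2d[i][j]
--
--         error.append(abs(calcular_suma_magica(n) - suma))
--
--
--     for i in range(n):
--         suma = 0
--         for j in range(n):
--             suma += arr_2d[j][i]
--         error.append(abs(calcular_suma_magica(n) - suma))
--
--
--     suma = 0
--     for i in range(n):
--         suma += arr_2d[i][i]
--     error.append(abs(calcular_suma_magica(n) - suma))
--
--
--
--     suma = 0
--     for i in range(n):
--         suma += arr_2d[i][n - 1 - i]
--     error.append(abs(calcular_suma_magica(n) - suma))
--
--
--
--     return sum(error)
-- ===== SOURCE B (Python) =====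
-- def calculaAptitudMin(X, n):
--     magic = n * (n * n + 1) // 2
--     cols = [0] * n
--     d1 = 0
--     d2 = 0
--     err = 0
--     for i in range(n):
--         row = X[i * n : i * n + n]
--         err += abs(magic - sum(row))
--         cols = [c + v for c, v in zip(cols, row)]
--         d1 += row[i]
--         d2 += row[n - 1 - i]
--     for c in cols:
--         err += abs(magic - c)
--     return err + abs(magic - d1) + abs(magic - d2)
-- ===== Notes on version B (the rewrite author's own statement) =====
-- stated objective: simpler
-- what changed: B drops the reshape helper and A's four separate scans (rows, columns, two diagonals) and instead makes one pass over the row slices of the flat list, accumulating row errors directly, column partial sums via zip, and both diagonal sums as it goes.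
import Mathlib
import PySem

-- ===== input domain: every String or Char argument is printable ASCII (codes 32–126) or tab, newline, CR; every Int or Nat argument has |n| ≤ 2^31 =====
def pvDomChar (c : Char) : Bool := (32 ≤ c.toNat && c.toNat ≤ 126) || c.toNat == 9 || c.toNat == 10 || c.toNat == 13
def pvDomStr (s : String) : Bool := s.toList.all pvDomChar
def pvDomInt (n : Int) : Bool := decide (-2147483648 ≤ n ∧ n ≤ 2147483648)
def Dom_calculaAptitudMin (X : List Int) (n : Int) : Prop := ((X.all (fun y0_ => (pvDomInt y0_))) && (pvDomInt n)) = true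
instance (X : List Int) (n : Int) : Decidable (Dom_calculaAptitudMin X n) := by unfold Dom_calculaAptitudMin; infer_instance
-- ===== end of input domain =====

-- B replaces A's reshape helper plus four separate scans by one pass over the row slices of the flat
-- list (objective: simpler); equivalence is about the return value on inputs where A returns normally.

-- ===== PORT A =====
-- Python's helper returns an error STRING when the length mismatches, and range(0, len, 0) raises
-- ValueError when n = 0 and the length matches; the port returns none in both cases.  A only ever
-- indexes the result when n > 0, where Pre_ guarantees the some-branch matrix; for n < 0 the result
-- is never inspected, so the Option default below is unreachable on Pre_ inputs.
def redimensionar_lista_a_matriz (lista : List Int) (n : Int) : Option (List (List Int)) :=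
  if (lista.length : Int) ≠ n * n then none
  else if n = 0 then none
  else some ((PySem.List.pyRange 0 (lista.length : Int) n).map
      (fun i => PySem.List.slice lista (some i) (some (i + n))))

def calcular_suma_magica (n : Int) : Int := PySem.Int.floordiv (n * (n ^ 2 + 1)) 2

-- arr_2d[i][j]; the defaults are only reached outside Pre_ (Python raises there)
def pvGet2 (arr : Option (List (List Int))) (i j : Int) : Int :=
  PySem.List.pyGetD (PySem.List.pyGetD (arr.getD []) i []) j 0

def calculaAptitudMin (X : List Int) (n : Int) : Int :=
  let arr_2d := redimensionar_lista_a_matriz X n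
  let error₁ := (PySem.List.pyRange 0 n 1).map (fun i =>
    |calcular_suma_magica n - (PySem.List.pyRange 0 n 1).foldl (fun suma j => suma + pvGet2 arr_2d i j) 0|)
  let error₂ := (PySem.List.pyRange 0 n 1).map (fun i =>
    |calcular_suma_magica n - (PySem.List.pyRange 0 n 1).foldl (fun suma j => suma + pvGet2 arr_2d j i) 0|)
  let suma₁ := (PySem.List.pyRange 0 n 1).foldl (fun suma i => suma + pvGet2 arr_2d i i) 0
  let suma₂ := (PySem.List.pyRange 0 n 1).foldl (fun suma i => suma + pvGet2 arr_2d i (n - 1 - i)) 0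
  (error₁ ++ error₂ ++ [|calcular_suma_magica n - suma₁|] ++ [|calcular_suma_magica n - suma₂|]).sum

-- ===== PORT B =====
def calculaAptitudMin_alt (X : List Int) (n : Int) : Int :=
  let magic := PySem.Int.floordiv (n * (n * n + 1)) 2
  let st := (PySem.List.pyRange 0 n 1).foldl
    (fun (st : List Int × Int × Int × Int) i =>
      let row := PySem.List.slice X (some (i * n)) (some (i * n + n))
      (List.zipWith (fun c v => c + v) st.1 row,
       st.2.1 + PySem.List.pyGetD row i 0,
       st.2.2.1 + PySem.List.pyGetD row (n - 1 - i) 0,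
       st.2.2.2 + |magic - row.sum|))
    (List.replicate n.toNat 0, 0, 0, 0)
  st.1.foldl (fun err c => err + |magic - c|) st.2.2.2 + |magic - st.2.1| + |magic - st.2.2.1|

-- ===== PRECONDITION & SPEC =====
-- Pre_ excludes exactly the inputs where Python A raises: n > 0 with len(X) ≠ n*n (TypeError while
-- summing the characters of the helper's error string) and n = 0 with X = [] (ValueError from
-- range(0, 0, 0)).  On every other input A returns a value.
def Pre_calculaAptitudMin (X : List Int) (n : Int) : Prop :=
  (0 < n → (X.length : Int) = n * n) ∧ ¬(n = 0 ∧ X = [])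
instance (X : List Int) (n : Int) : Decidable (Pre_calculaAptitudMin X n) := by
  unfold Pre_calculaAptitudMin; infer_instance

def pvWitness_calculaAptitudMin : List Int × Int := ([2, 7, 6, 9, 5, 1, 4, 3, 8], 3)

def Spec_calculaAptitudMin (X : List Int) (n : Int) (out : Int) : Prop := out = calculaAptitudMin_alt X n
instance (X : List Int) (n : Int) (out : Int) : Decidable (Spec_calculaAptitudMin X n out) := by
  unfold Spec_calculaAptitudMin; infer_instance

-- ===== CLAIM (what is proved, stated in full; the proofs are below) =====
def Claim_equal_calculaAptitudMin : Prop := ∀ (X : List Int) (n : Int), Dom_calculaAptitudMin X n → Pre_calculaAptitudMin X n → Spec_calculaAptitudMin X n (calculaAptitudMin X n)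

-- ===== LEMMAS AND PROOFS =====

-- the i-th row of the square, as a map over index arithmetic on the flat list
def pvRow (X : List Int) (N i : Nat) : List Int :=
  (List.range N).map (fun j => X.getD (i * N + j) 0)

-- the slice X[i*N : i*N+N] is the i-th row when the flat list is long enough
theorem pvSlice_eq_row (X : List Int) (N i : Nat) (hi : i < N) (hlen : N * N ≤ X.length) :
    (X.drop (i * N)).take N = pvRow X N i := by
  have hbound : i * N + N ≤ X.length := by
    calc i * N + N = (i + 1) * N := by ring
    _ ≤ N * N := Nat.mul_le_mul_right N (by omega)
    _ ≤ X.length := hlen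
  apply List.ext_getElem
  · simp [pvRow]; omega
  · intro k h1 h2
    have hk : k < N := by simpa [pvRow] using h2
    have hx : i * N + k < X.length := by omega
    simp [pvRow, List.getElem_take, List.getElem_drop, List.getD_eq_getElem?_getD,
      List.getElem?_eq_getElem hx]

theorem pvPyRangeN (N : Nat) :
    PySem.List.pyRange 0 (N : Int) 1 = (List.range N).map (Nat.cast : Nat → Int) := by
  rw [PySem.List.pyRange_one]
  simp

-- column sums and diagonal sums of the square, over the flat list
def pvColSum (X : List Int) (N k : Nat) : Int :=
  ((List.range N).map (fun i => X.getD (i * N + k) 0)).sum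
def pvD1 (X : List Int) (N : Nat) : Int :=
  ((List.range N).map (fun i => X.getD (i * N + i) 0)).sum
def pvD2 (X : List Int) (N : Nat) : Int :=
  ((List.range N).map (fun i => X.getD (i * N + (N - 1 - i)) 0)).sum

theorem pvZipMapMap (l : List Nat) (f g : Nat → Int) :
    List.zipWith (fun c v => c + v) (l.map f) (l.map g) = l.map (fun x => f x + g x) := by
  induction l with
  | nil => rfl
  | cons h t ih => simp [ih]

theorem pvRow_getD (X : List Int) (N i j : Nat) (hj : j < N) :
    PySem.List.pyGetD (pvRow X N i) (j : Int) 0 = X.getD (i * N + j) 0 := by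
  rw [PySem.List.pyGetD_natCast, pvRow, PySem.List.getD_map_range _ _ _ _ hj]

theorem pvSliceInt (X : List Int) (N i : Nat) (hi : i < N) (hlen : N * N ≤ X.length) :
    PySem.List.slice X (some ((i : Int) * (N : Int))) (some ((i : Int) * (N : Int) + (N : Int)))
      = pvRow X N i := by
  have h1 : (i : Int) * (N : Int) = ((i * N : Nat) : Int) := by push_cast; ring
  rw [h1, PySem.List.slice_natCast_add, pvSlice_eq_row X N i hi hlen]

-- the reshape helper, on a matching length, is the list of rows
theorem pvMatrix (X : List Int) (N : Nat) (hN : 0 < N) (hlen : X.length = N * N) :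
    redimensionar_lista_a_matriz X (N : Int) = some ((List.range N).map (pvRow X N)) := by
  unfold redimensionar_lista_a_matriz
  rw [if_neg (by push_cast [hlen]; exact fun h => h rfl), if_neg (by exact_mod_cast hN.ne')]
  congr 1
  rw [PySem.List.pyRange_of_pos _ _ (by exact_mod_cast hN : (0:Int) < (N:Int))]
  have hb : (0 : Int) < (X.length : Int) := by
    have : 0 < X.length := hlen ▸ Nat.mul_pos hN hN
    exact_mod_cast this
  rw [if_pos hb]
  have hNz : (N : Int) ≠ 0 := by exact_mod_cast hN.ne'
  have hcount : (((X.length : Int) - 0 + ↑N - 1) / ↑N).toNat = N := by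
    have hX : (X.length : Int) = ↑N * ↑N := by push_cast [hlen]; ring
    rw [hX]
    have h1 : ((N:Int) * ↑N - 0 + ↑N - 1) = (↑N - 1) + ↑N * ↑N := by ring
    rw [h1, Int.add_mul_ediv_right _ _ hNz,
      Int.ediv_eq_zero_of_lt (by omega) (by omega)]
    omega
  rw [hcount, List.map_map]
  apply List.map_congr_left
  intro k hk
  simp only [Function.comp]
  have hk' : k < N := List.mem_range.mp hk
  have h2 : ((0:Int) + (N:Int) * ↑k) = (k:Int) * ↑N := by ring
  rw [h2]
  exact pvSliceInt X N k hk' (le_of_eq hlen.symm)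

theorem pvGet2_eq (X : List Int) (N i j : Nat) (hN : 0 < N) (hlen : X.length = N * N)
    (hi : i < N) (hj : j < N) :
    pvGet2 (redimensionar_lista_a_matriz X (N : Int)) (i : Int) (j : Int) = X.getD (i * N + j) 0 := by
  rw [pvMatrix X N hN hlen]
  unfold pvGet2
  simp only [Option.getD_some]
  have h1 : PySem.List.pyGetD ((List.range N).map (pvRow X N)) (i : Int) [] = pvRow X N i := by
    rw [PySem.List.pyGetD_natCast, PySem.List.getD_map_range _ _ _ _ hi]
  rw [h1]
  exact pvRow_getD X N i j hj

-- A's value in canonical form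
theorem pvA_eq (X : List Int) (N : Nat) (hN : 0 < N) (hlen : X.length = N * N) :
    calculaAptitudMin X (N : Int)
      = ((List.range N).map (fun i => |calcular_suma_magica N - (pvRow X N i).sum|)).sum
      + ((List.range N).map (fun k => |calcular_suma_magica N - pvColSum X N k|)).sum
      + |calcular_suma_magica N - pvD1 X N| + |calcular_suma_magica N - pvD2 X N| := by
  simp only [calculaAptitudMin, pvPyRangeN, List.foldl_map, List.map_map, PySem.List.foldl_add,
    List.sum_append, List.sum_cons, List.sum_nil]
  simp only [Function.comp_def, zero_add, add_zero]
  have harr : ∀ (i j : Nat), i < N → j < N →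
      pvGet2 (redimensionar_lista_a_matriz X (N : Int)) (i : Int) (j : Int) = X.getD (i * N + j) 0 :=
    fun i j hi hj => pvGet2_eq X N i j hN hlen hi hj
  congr 1
  congr 1
  congr 1
  · -- row errors
    apply congrArg List.sum
    apply List.map_congr_left
    intro i hi
    apply congrArg abs
    apply congrArg (calcular_suma_magica (N : Int) - ·)
    apply congrArg List.sum
    rw [pvRow]
    apply List.map_congr_left
    intro j hj
    exact harr i j (List.mem_range.mp hi) (List.mem_range.mp hj)
  · -- column errors
    apply congrArg List.sum
    apply List.map_congr_left
    intro k hk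
    apply congrArg abs
    apply congrArg (calcular_suma_magica (N : Int) - ·)
    rw [pvColSum]
    apply congrArg List.sum
    apply List.map_congr_left
    intro i hi
    exact harr i k (List.mem_range.mp hi) (List.mem_range.mp hk)
  · -- main diagonal
    apply congrArg abs
    apply congrArg (calcular_suma_magica (N : Int) - ·)
    rw [pvD1]
    apply congrArg List.sum
    apply List.map_congr_left
    intro i hi
    exact harr i i (List.mem_range.mp hi) (List.mem_range.mp hi)
  · -- anti-diagonal
    apply congrArg abs
    apply congrArg (calcular_suma_magica (N : Int) - ·)
    rw [pvD2]
    apply congrArg List.sum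
    apply List.map_congr_left
    intro i hi
    have hi' : i < N := List.mem_range.mp hi
    have hc : ((N : Int) - 1 - (i : Int)) = ((N - 1 - i : Nat) : Int) := by omega
    rw [hc]
    exact harr i (N - 1 - i) hi' (by omega)

-- the state of B's single pass after the whole loop
theorem pvB_fold (X : List Int) (N : Nat) (magic : Int) (hlen : X.length = N * N)
    (m : Nat) (hm : m ≤ N) :
    (List.range m).foldl
      (fun (st : List Int × Int × Int × Int) (i : Nat) =>
        (List.zipWith (fun c v => c + v) st.1
           (PySem.List.slice X (some ((i : Int) * (N : Int))) (some ((i : Int) * (N : Int) + (N : Int)))),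
         st.2.1 + PySem.List.pyGetD
           (PySem.List.slice X (some ((i : Int) * (N : Int))) (some ((i : Int) * (N : Int) + (N : Int)))) (i : Int) 0,
         st.2.2.1 + PySem.List.pyGetD
           (PySem.List.slice X (some ((i : Int) * (N : Int))) (some ((i : Int) * (N : Int) + (N : Int)))) ((N : Int) - 1 - (i : Int)) 0,
         st.2.2.2 + |magic - (PySem.List.slice X (some ((i : Int) * (N : Int))) (some ((i : Int) * (N : Int) + (N : Int)))).sum|))
      (List.replicate N 0, 0, 0, 0)
    = ((List.range N).map (fun k => ((List.range m).map (fun i => X.getD (i * N + k) 0)).sum),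
       ((List.range m).map (fun i => X.getD (i * N + i) 0)).sum,
       ((List.range m).map (fun i => X.getD (i * N + (N - 1 - i)) 0)).sum,
       ((List.range m).map (fun i => |magic - (pvRow X N i).sum|)).sum) := by
  induction m with
  | zero =>
    simp [List.map_const']
  | succ m ih =>
    have hm' : m < N := hm
    rw [List.range_succ, List.foldl_append, ih (le_of_lt hm'), List.foldl_cons, List.foldl_nil]
    rw [pvSliceInt X N m hm' (le_of_eq hlen.symm)]
    have hcast : ((N : Int) - 1 - (m : Int)) = ((N - 1 - m : Nat) : Int) := by omega
    refine Prod.ext ?_ (Prod.ext ?_ (Prod.ext ?_ ?_)) <;> simp only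
    · -- columns
      rw [show pvRow X N m = (List.range N).map (fun k => X.getD (m * N + k) 0) from rfl]
      rw [pvZipMapMap]
      apply List.map_congr_left
      intro k _
      simp
    · -- main diagonal
      rw [pvRow_getD X N m m hm']
      simp
    · -- anti-diagonal
      rw [hcast, pvRow_getD X N m (N - 1 - m) (by omega)]
      simp
    · -- row errors
      simp

-- B's value in canonical form
theorem pvB_eq (X : List Int) (N : Nat) (hlen : X.length = N * N) :
    calculaAptitudMin_alt X (N : Int)
      = ((List.range N).map (fun i => |calcular_suma_magica N - (pvRow X N i).sum|)).sum
      + ((List.range N).map (fun k => |calcular_suma_magica N - pvColSum X N k|)).sum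
      + |calcular_suma_magica N - pvD1 X N| + |calcular_suma_magica N - pvD2 X N| := by
  have hmagic : PySem.Int.floordiv ((N : Int) * ((N : Int) * (N : Int) + 1)) 2
      = calcular_suma_magica (N : Int) := by
    rw [calcular_suma_magica]
    congr 1
    ring
  simp only [calculaAptitudMin_alt, pvPyRangeN, List.foldl_map, Int.toNat_natCast]
  rw [pvB_fold X N _ hlen N le_rfl]
  simp only [PySem.List.foldl_add, List.map_map, Function.comp_def, hmagic, pvColSum, pvD1, pvD2]

-- ===== VERDICT (by name: the statement is the Claim_ definition above) =====
theorem calculaAptitudMin_spec : Claim_equal_calculaAptitudMin := by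
  intro X n _ hpre
  unfold Spec_calculaAptitudMin
  rcases le_or_gt n 0 with hn | hn
  · -- n ≤ 0: both loops are empty, both return 2*|magic|
    have h1 : PySem.List.pyRange 0 n 1 = [] := PySem.List.pyRange_one_eq_nil hn
    have h2 : n.toNat = 0 := by omega
    simp [calculaAptitudMin, calculaAptitudMin_alt, h1, h2, calcular_suma_magica]
    ring_nf
  · -- 0 < n
    obtain ⟨N, rfl⟩ : ∃ N : Nat, n = (N : Int) := ⟨n.toNat, (Int.toNat_of_nonneg hn.le).symm⟩
    have hN : 0 < N := by exact_mod_cast hn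
    have hlen : X.length = N * N := by
      have := hpre.1 hn
      exact_mod_cast this
    rw [pvA_eq X N hN hlen, pvB_eq X N hlen]
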